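-- pv_equiv track=rewrite | github.com/ilialecha/Programming_1 | Exam-1-review/count_word_endings.py | count_word_endings
-- ===== SOURCE A (Python) =====
-- def count_word_endings(x):
-- 	'''
-- 	>>> count_word_endings( ('dog', 'cat', 'birds', 'reached', 'eat') )
-- 	(1, 1, 2)
-- 	>>> count_word_endings( ('dog', 'had', 'cat', 'reached') )
-- 	(0, 2, 1)
-- 	>>> count_word_endings( ('dog', 'fog', 'why', 'not') )
-- 	(0, 0, 1)
-- 	>>> sum( count_word_endings( ('dog', 'had', 'cat', 'reached') ) )
-- 	3
-- 	'''
--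
-- 	s_term_auto = sum((1 for word in x if word[-1]=='s'))
--
-- 	d_term_auto = sum((1 for word in x if word[-1]=='d'))
--
-- 	t_term_auto = sum((1 for word in x if word[-1]=='t'))
--
-- 	return (s_term_auto, d_term_auto, t_term_auto)
--
--
-- 	'''
-- 	s_term = 0
-- 	d_term = 0
-- 	t_term = 0
--
-- 	for word in x:
-- 		if word[-1] == "s":
-- 			s_term += 1
-- 		elif word[-1] == "d":
-- 			d_term += 1
-- 		elif word[-1] == "t":
-- 			t_term += 1
-- 	return (s_term, d_term, t_term)
-- 	'''
-- ===== SOURCE B (Python) =====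
-- def count_word_endings(x):
--     c = {}
--     for word in x:
--         ch = word[-1]
--         c[ch] = c.get(ch, 0) + 1
--     return (c.get('s', 0), c.get('d', 0), c.get('t', 0))
-- ===== Notes on version B (the rewrite author's own statement) =====
-- stated objective: idiomatic
-- what changed: One pass tallying every word's last character into a frequency dict, then reading the three entries, instead of three separate generator scans of the list.
import Mathlib
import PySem

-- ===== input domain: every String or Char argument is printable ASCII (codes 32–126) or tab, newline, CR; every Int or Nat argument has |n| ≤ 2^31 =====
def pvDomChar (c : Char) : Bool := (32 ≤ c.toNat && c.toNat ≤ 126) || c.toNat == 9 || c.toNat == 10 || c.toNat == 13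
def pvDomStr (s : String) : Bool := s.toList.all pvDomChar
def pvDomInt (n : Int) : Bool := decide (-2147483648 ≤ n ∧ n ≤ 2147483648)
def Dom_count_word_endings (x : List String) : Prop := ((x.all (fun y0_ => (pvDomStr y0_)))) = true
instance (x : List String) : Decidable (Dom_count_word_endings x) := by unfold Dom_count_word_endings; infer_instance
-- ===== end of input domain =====

-- B tallies last characters in one dict pass instead of A's three scans (idiomatic; return value only).
-- ===== PORT A =====
def count_word_endings (x : List String) : Int × Int × Int :=
  let s_term_auto := x.foldl (fun acc word => if PySem.Str.pyGet? word (-1) = some 's' then acc + 1 else acc) (0 : Int)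
  let d_term_auto := x.foldl (fun acc word => if PySem.Str.pyGet? word (-1) = some 'd' then acc + 1 else acc) (0 : Int)
  let t_term_auto := x.foldl (fun acc word => if PySem.Str.pyGet? word (-1) = some 't' then acc + 1 else acc) (0 : Int)
  (s_term_auto, d_term_auto, t_term_auto)

-- ===== PORT B =====
def count_word_endings_alt (x : List String) : Int × Int × Int :=
  -- c[ch] = c.get(ch, 0) + 1, with the (never-raising-under-Pre_) last char as Option Char key
  let c := x.foldl (fun d word => d.modify (PySem.Str.pyGet? word (-1)) 0 (· + 1))
    (PySem.Dict.empty : PySem.Dict (Option Char) Int)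
  (c.getD (some 's') 0, c.getD (some 'd') 0, c.getD (some 't') 0)

-- ===== PRECONDITION & SPEC =====
-- Pre_ excludes inputs containing an empty string, on which word[-1] raises IndexError in both A and B.
def Pre_count_word_endings (x : List String) : Prop := ∀ w ∈ x, w ≠ ""
instance (x : List String) : Decidable (Pre_count_word_endings x) := by unfold Pre_count_word_endings; infer_instance
def pvWitness_count_word_endings : List String := ["dogs", "cat", "reached"]
def Spec_count_word_endings (x : List String) (out : Int × Int × Int) : Prop := out = count_word_endings_alt x
instance (x : List String) (out : Int × Int × Int) : Decidable (Spec_count_word_endings x out) := by unfold Spec_count_word_endings; infer_instance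

-- ===== CLAIM (what is proved, stated in full; the proofs are below) =====
def Claim_equal_count_word_endings : Prop := ∀ (x : List String), Dom_count_word_endings x → Pre_count_word_endings x → Spec_count_word_endings x (count_word_endings x)

-- ===== LEMMAS AND PROOFS =====

theorem pv_countA (c : Char) : ∀ (l : List String) (acc : Int),
    l.foldl (fun acc word => if PySem.Str.pyGet? word (-1) = some c then acc + 1 else acc) acc
      = acc + ((l.map (fun w => PySem.Str.pyGet? w (-1))).count (some c) : Int) := by
  intro l
  induction l with
  | nil => intro acc; simp
  | cons w t ih =>
    intro acc
    rw [List.foldl_cons, ih, List.map_cons, List.count_cons]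
    by_cases h : PySem.Str.pyGet? w (-1) = some c
    · rw [if_pos h, h]
      simp only [BEq.rfl, if_true]
      push_cast
      ring
    · rw [if_neg h]
      have hb : (PySem.Str.pyGet? w (-1) == some c) = false := beq_eq_false_iff_ne.mpr h
      rw [hb, if_neg (by simp)]
      push_cast
      ring
theorem pv_alt_counter (x : List String) :
    x.foldl (fun d word => d.modify (PySem.Str.pyGet? word (-1)) 0 (· + 1))
        (PySem.Dict.empty : PySem.Dict (Option Char) Int)
      = PySem.Dict.counter (x.map (fun w => PySem.Str.pyGet? w (-1))) := by
  rw [PySem.Dict.counter_eq_foldl, List.foldl_map]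

-- ===== VERDICT (by name: the statement is the Claim_ definition above) =====
theorem count_word_endings_spec : Claim_equal_count_word_endings := by
  intro x _ _
  unfold Spec_count_word_endings count_word_endings count_word_endings_alt
  dsimp only
  rw [pv_alt_counter, pv_countA 's' x 0, pv_countA 'd' x 0, pv_countA 't' x 0]
  simp [PySem.Dict.getD_counter]
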